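-- pv_equiv track=rewrite | github.com/carlok/deck-lovers | tex_extract.py | skip_opt
-- ===== SOURCE A (Python) =====
-- def skip_opt(text, pos):
--     """Skip optional [...] arg. Returns end_pos."""
--     while pos < len(text) and text[pos] in ' \t\n':
--         pos += 1
--     if pos < len(text) and text[pos] == '[':
--         depth = 1
--         pos += 1
--         while pos < len(text) and depth:
--             if text[pos] == '[':
--                 depth += 1
--             elif text[pos] == ']':
--                 depth -= 1
--             pos += 1
--     return pos
-- ===== SOURCE B (Python) =====
-- def _char_at(text, p):
--     """Current character, or None when the scan has run past the end
--     (Python's own indexing handles negative p)."""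
--     return text[p] if p < len(text) else None
--
-- def _after_ws(text, p):
--     if _char_at(text, p) in (' ', '\t', '\n'):
--         return _after_ws(text, p + 1)
--     return p
--
-- def _after_group(text, p):
--     # p is just past an opening '['; return the index just past its matching
--     # ']' (or the stop position if the text ends first), recursing once per
--     # nested bracket group instead of tracking a depth counter.
--     c = _char_at(text, p)
--     if c is None:
--         return p
--     if c == ']':
--         return p + 1
--     if c == '[':
--         return _after_group(text, _after_group(text, p + 1))
--     return _after_group(text, p + 1)
--
-- def skip_opt(text, pos):
--     """Skip optional [...] arg. Returns end_pos."""
--     p = _after_ws(text, pos)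
--     if _char_at(text, p) == '[':
--         return _after_group(text, p + 1)
--     return p
-- ===== Notes on version B (the rewrite author's own statement) =====
-- stated objective: alternative
-- what changed: The flat depth-counter loop is replaced by mutually composed recursive helpers over an optional current-character view: whitespace is skipped by a recursive helper and each nested [...] group is skipped by one recursive call per nesting level instead of a depth counter.
import Mathlib
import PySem

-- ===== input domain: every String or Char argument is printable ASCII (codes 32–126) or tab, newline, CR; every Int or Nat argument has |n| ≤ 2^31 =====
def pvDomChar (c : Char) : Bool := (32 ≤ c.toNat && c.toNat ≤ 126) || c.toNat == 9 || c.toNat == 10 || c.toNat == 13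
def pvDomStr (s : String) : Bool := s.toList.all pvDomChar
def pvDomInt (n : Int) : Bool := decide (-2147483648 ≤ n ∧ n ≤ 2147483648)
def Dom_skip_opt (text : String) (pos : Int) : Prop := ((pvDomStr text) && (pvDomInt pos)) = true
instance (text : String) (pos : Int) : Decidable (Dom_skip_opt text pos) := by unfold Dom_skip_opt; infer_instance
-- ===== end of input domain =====

-- B replaces A's flat depth-counter loop with recursive helpers over an optional
-- current-character view, one recursive call per nested [...] group
-- (objective: alternative decomposition, same cost).

-- ===== PORT A =====
-- whitespace-skip loop of A: while pos < len(text) and text[pos] in ' \t\n': pos += 1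
def wsLoopA (cs : List Char) (pos : Int) : Int :=
  if h : pos < (cs.length : Int) ∧
      (PySem.List.pyGet? cs pos = some ' ' ∨ PySem.List.pyGet? cs pos = some '\t' ∨
       PySem.List.pyGet? cs pos = some '\n') then
    wsLoopA cs (pos + 1)
  else pos
termination_by ((cs.length : Int) - pos).toNat
decreasing_by omega

-- depth-tracking loop of A: while pos < len(text) and depth: …
def depthLoopA (cs : List Char) (pos : Int) (depth : Int) : Int :=
  if h : pos < (cs.length : Int) ∧ depth ≠ 0 then
    depthLoopA cs (pos + 1)
      (if PySem.List.pyGet? cs pos = some '[' then depth + 1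
       else if PySem.List.pyGet? cs pos = some ']' then depth - 1 else depth)
  else pos
termination_by ((cs.length : Int) - pos).toNat
decreasing_by omega

def skip_opt (text : String) (pos : Int) : Int :=
  if wsLoopA text.toList pos < (text.toList.length : Int) ∧
      PySem.List.pyGet? text.toList (wsLoopA text.toList pos) = some '[' then
    depthLoopA text.toList (wsLoopA text.toList pos + 1) 1
  else wsLoopA text.toList pos

-- ===== PORT B =====
-- _char_at of Source B: the current character, or none past the end
-- (exact within Pre_, i.e. for -len ≤ p; below -len Source B raises IndexError, outside Pre_)
def charAtB (cs : List Char) (p : Int) : Option Char :=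
  if p < (cs.length : Int) then PySem.List.pyGet? cs p else none

-- cited by the termination proof of afterWs
theorem charAtB_lt {cs : List Char} {p : Int} {c : Char}
    (h : charAtB cs p = some c) : p < (cs.length : Int) := by
  by_contra hn
  simp [charAtB, hn] at h

-- _after_ws of Source B: recursive whitespace skip, testing the optional character
-- against the tuple (' ', '\t', '\n')
def afterWs (cs : List Char) (p : Int) : Int :=
  if h : charAtB cs p ∈ [some ' ', some '\t', some '\n'] then afterWs cs (p + 1)
  else p
termination_by ((cs.length : Int) - p).toNat
decreasing_by
  have hlt : p < (cs.length : Int) := by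
    simp only [List.mem_cons, List.not_mem_nil, or_false] at h
    rcases h with h | h | h <;> exact charAtB_lt h
  omega

-- _after_group of Source B: recursion over the nested bracket structure; the fuel
-- argument only makes the nested recursion structurally terminating (any fuel
-- ≥ len - p yields Source B's value)
def afterGroup (cs : List Char) : Nat → Int → Int
  | 0, p => p
  | f + 1, p =>
    if charAtB cs p = none then p
    else if charAtB cs p = some ']' then p + 1
    else if charAtB cs p = some '[' then afterGroup cs f (afterGroup cs f (p + 1))
    else afterGroup cs f (p + 1)

def skip_opt_alt (text : String) (pos : Int) : Int :=
  let cs := text.toList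
  let p := afterWs cs pos
  if charAtB cs p = some '[' then afterGroup cs (2 * cs.length + 1) (p + 1)
  else p

-- ===== PRECONDITION & SPEC =====
-- Pre_ excludes pos < -len(text), exactly where both Pythons raise IndexError on text[pos]
def Pre_skip_opt (text : String) (pos : Int) : Prop := -(text.length : Int) ≤ pos
instance (text : String) (pos : Int) : Decidable (Pre_skip_opt text pos) := by
  unfold Pre_skip_opt; infer_instance

def pvWitness_skip_opt : String × Int := (" [a[b]]c", 0)

def Spec_skip_opt (text : String) (pos : Int) (out : Int) : Prop := out = skip_opt_alt text pos
instance (text : String) (pos : Int) (out : Int) : Decidable (Spec_skip_opt text pos out) := by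
  unfold Spec_skip_opt; infer_instance

-- ===== CLAIM (what is proved, stated in full; the proofs are below) =====
def Claim_equal_skip_opt : Prop := ∀ (text : String) (pos : Int), Dom_skip_opt text pos → Pre_skip_opt text pos → Spec_skip_opt text pos (skip_opt text pos)

-- ===== LEMMAS AND PROOFS =====

theorem charAtB_eq (cs : List Char) (p : Int)
    (hp : p < (cs.length : Int)) : charAtB cs p = PySem.List.pyGet? cs p := by
  simp [charAtB, hp]

theorem pyGet?_isSome (cs : List Char) (p : Int) (hlo : -(cs.length : Int) ≤ p)
    (hp : p < (cs.length : Int)) : ∃ c, PySem.List.pyGet? cs p = some c := by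
  rcases h : PySem.List.pyGet? cs p with _ | c
  · rw [PySem.List.pyGet?_eq_none_iff] at h
    exact absurd ⟨hlo, hp⟩ h
  · exact ⟨c, rfl⟩

theorem wsLoopA_mono (cs : List Char) (pos : Int) : pos ≤ wsLoopA cs pos := by
  fun_induction wsLoopA cs pos with
  | case1 pos h ih => omega
  | case2 pos h => exact le_refl pos

-- equivalence of A's and B's whitespace-stepping conditions inside Pre_
theorem wsCond_iff (cs : List Char) (p : Int) :
    charAtB cs p ∈ [some ' ', some '\t', some '\n'] ↔
    (p < (cs.length : Int) ∧
      (PySem.List.pyGet? cs p = some ' ' ∨ PySem.List.pyGet? cs p = some '\t' ∨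
       PySem.List.pyGet? cs p = some '\n')) := by
  constructor
  · intro h
    simp only [List.mem_cons, List.not_mem_nil, or_false] at h
    rcases h with h | h | h <;>
      exact ⟨charAtB_lt h, by rw [← charAtB_eq cs p (charAtB_lt h)]; tauto⟩
  · rintro ⟨hp, hw⟩
    simp only [List.mem_cons, List.not_mem_nil, or_false, charAtB_eq cs p hp]
    tauto

theorem ws_eq (cs : List Char) :
    ∀ (n : Nat) (pos : Int), ((cs.length : Int) - pos).toNat ≤ n →
      -(cs.length : Int) ≤ pos → wsLoopA cs pos = afterWs cs pos := by
  intro n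
  induction n with
  | zero =>
    intro pos hn hlo
    have hp : ¬ pos < (cs.length : Int) := by omega
    rw [wsLoopA, dif_neg (by tauto), afterWs,
      dif_neg (fun h => hp ((wsCond_iff cs pos).mp h).1)]
  | succ n ih =>
    intro pos hn hlo
    by_cases hc : pos < (cs.length : Int) ∧
        (PySem.List.pyGet? cs pos = some ' ' ∨ PySem.List.pyGet? cs pos = some '\t' ∨
         PySem.List.pyGet? cs pos = some '\n')
    · rw [wsLoopA, dif_pos hc, afterWs, dif_pos ((wsCond_iff cs pos).mpr hc)]
      exact ih (pos + 1) (by omega) (by omega)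
    · rw [wsLoopA, dif_neg hc, afterWs, dif_neg (fun h => hc ((wsCond_iff cs pos).mp h))]

theorem afterGroup_mono (cs : List Char) (f : Nat) :
    ∀ p : Int, p ≤ afterGroup cs f p := by
  induction f with
  | zero => intro p; simp [afterGroup]
  | succ f ih =>
    intro p
    rw [afterGroup]
    split_ifs
    · exact le_refl p
    · omega
    · exact le_trans (by omega) (le_trans (ih (p + 1)) (ih _))
    · exact le_trans (by omega) (ih (p + 1))

theorem afterGroup_stop (cs : List Char) (f : Nat) (p : Int)
    (h : ¬ p < (cs.length : Int)) : afterGroup cs f p = p := by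
  cases f with
  | zero => rfl
  | succ f =>
    rw [afterGroup, if_pos (show charAtB cs p = none by simp [charAtB, h])]

theorem afterGroup_fuel_succ (cs : List Char) :
    ∀ (f : Nat) (p : Int), (cs.length : Int) ≤ p + f →
      afterGroup cs (f + 1) p = afterGroup cs f p := by
  intro f
  induction f with
  | zero =>
    intro p h
    have hp : ¬ p < (cs.length : Int) := by omega
    rw [afterGroup_stop cs _ p hp, afterGroup_stop cs _ p hp]
  | succ f ih =>
    intro p h
    have h1 : (cs.length : Int) ≤ (p + 1) + f := by push_cast at h ⊢; omega
    conv_lhs => rw [afterGroup]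
    conv_rhs => rw [afterGroup]
    split_ifs
    · rfl
    · rfl
    · rw [ih (p + 1) h1]
      exact ih _ (by have := afterGroup_mono cs f (p + 1); omega)
    · exact ih (p + 1) h1

theorem afterGroup_succ_of_fuel (cs : List Char) (F : Nat) (p : Int)
    (hF : (cs.length : Int) ≤ p + F) (hp : p < (cs.length : Int)) :
    ∃ f, F = f + 1 ∧ (cs.length : Int) ≤ (p + 1) + f := by
  cases F with
  | zero => exact absurd hp (by push_cast at hF; omega)
  | succ f => exact ⟨f, rfl, by push_cast at hF ⊢; omega⟩

-- unfolding steps of B's group skipper at a sufficiently-fuelled in-range position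
theorem ag_open (cs : List Char) (F : Nat) (p : Int)
    (hF : (cs.length : Int) ≤ p + F) (hp : p < (cs.length : Int))
    (h1 : charAtB cs p = some '[') :
    afterGroup cs F p = afterGroup cs F (afterGroup cs F (p + 1)) := by
  obtain ⟨f, rfl, h2⟩ := afterGroup_succ_of_fuel cs _ p hF hp
  conv_lhs => rw [afterGroup]
  rw [if_neg (by simp [h1]), if_neg (by simp [h1]), if_pos h1,
    afterGroup_fuel_succ cs f (p + 1) h2,
    afterGroup_fuel_succ cs f (afterGroup cs f (p + 1))
      (by have := afterGroup_mono cs f (p + 1); omega)]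

theorem ag_close (cs : List Char) (F : Nat) (p : Int)
    (hF : (cs.length : Int) ≤ p + F) (hp : p < (cs.length : Int))
    (h1 : charAtB cs p = some ']') :
    afterGroup cs F p = p + 1 := by
  obtain ⟨f, rfl, h2⟩ := afterGroup_succ_of_fuel cs _ p hF hp
  rw [afterGroup, if_neg (by simp [h1]), if_pos h1]

theorem ag_other (cs : List Char) (F : Nat) (p : Int) (c : Char)
    (hF : (cs.length : Int) ≤ p + F) (hp : p < (cs.length : Int))
    (h1 : charAtB cs p = some c) (h2 : c ≠ '[') (h3 : c ≠ ']') :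
    afterGroup cs F p = afterGroup cs F (p + 1) := by
  obtain ⟨f, rfl, h4⟩ := afterGroup_succ_of_fuel cs _ p hF hp
  conv_lhs => rw [afterGroup]
  rw [if_neg (by simp [h1]), if_neg (by simp [h1, h3]), if_neg (by simp [h1, h2])]
  exact (afterGroup_fuel_succ cs f (p + 1) h4).symm

theorem iterate_stop (cs : List Char) (F : Nat) (p : Int)
    (h : ¬ p < (cs.length : Int)) :
    ∀ k, (afterGroup cs F)^[k] p = p := by
  intro k
  induction k with
  | zero => rfl
  | succ k ih =>
    rw [Function.iterate_succ_apply, afterGroup_stop cs F p h, ih]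

-- the depth-counter loop of A equals d iterations of B's group skipper
theorem depthLoop_eq_iter (cs : List Char) (F : Nat) :
    ∀ (n : Nat) (pos d : Int), ((cs.length : Int) - pos).toNat ≤ n →
      (cs.length : Int) ≤ pos + F → 0 ≤ d → -(cs.length : Int) ≤ pos →
      depthLoopA cs pos d = (afterGroup cs F)^[d.toNat] pos := by
  intro n
  induction n with
  | zero =>
    intro pos d hn hF hd hlo
    have hp : ¬ pos < (cs.length : Int) := by omega
    rw [depthLoopA, dif_neg (by tauto), iterate_stop cs F pos hp]
  | succ n ih =>
    intro pos d hn hF hd hlo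
    by_cases hc : pos < (cs.length : Int) ∧ d ≠ 0
    · obtain ⟨k, hk⟩ : ∃ k : Nat, d.toNat = k + 1 := ⟨(d - 1).toNat, by omega⟩
      have hn' : ((cs.length : Int) - (pos + 1)).toNat ≤ n := by omega
      have hF' : (cs.length : Int) ≤ (pos + 1) + F := by omega
      have hlo' : -(cs.length : Int) ≤ pos + 1 := by omega
      have he := charAtB_eq cs pos hc.1
      rw [depthLoopA, dif_pos hc]
      by_cases h1 : PySem.List.pyGet? cs pos = some '['
      · rw [if_pos h1, ih (pos + 1) (d + 1) hn' hF' (by omega) hlo']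
        have h2 : (d + 1).toNat = k + 2 := by omega
        rw [h2, hk]
        simp only [Function.iterate_succ_apply]
        congr 1
        exact (ag_open cs F pos hF hc.1 (he.trans h1)).symm
      · by_cases h2 : PySem.List.pyGet? cs pos = some ']'
        · rw [if_neg h1, if_pos h2, ih (pos + 1) (d - 1) hn' hF' (by omega) hlo']
          have h3 : (d - 1).toNat = k := by omega
          rw [h3, hk, Function.iterate_succ_apply]
          congr 1
          exact (ag_close cs F pos hF hc.1 (he.trans h2)).symm
        · rw [if_neg h1, if_neg h2, ih (pos + 1) d hn' hF' hd hlo', hk]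
          simp only [Function.iterate_succ_apply]
          congr 1
          obtain ⟨c, hcv⟩ := pyGet?_isSome cs pos hlo hc.1
          have hc1 : c ≠ '[' := fun h => h1 (by rw [hcv, h])
          have hc2 : c ≠ ']' := fun h => h2 (by rw [hcv, h])
          exact (ag_other cs F pos c hF hc.1 (he.trans hcv) hc1 hc2).symm
    · rw [depthLoopA, dif_neg hc]
      rcases not_and_or.mp hc with hp | hd0
      · rw [iterate_stop cs F pos hp]
      · have : d = 0 := by omega
        simp [this]

-- ===== VERDICT (by name: the statement is the Claim_ definition above) =====
theorem skip_opt_spec : Claim_equal_skip_opt := by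
  intro text pos _ hpre
  simp only [Spec_skip_opt, skip_opt, skip_opt_alt]
  set cs := text.toList with hcs
  have hlen : (cs.length : Int) = (text.length : Int) := by
    rw [hcs, String.length_toList]
  have hlo : -(cs.length : Int) ≤ pos := by
    unfold Pre_skip_opt at hpre; omega
  have hws := ws_eq cs ((cs.length : Int) - pos).toNat pos (le_refl _) hlo
  rw [← hws]
  set p := wsLoopA cs pos with hpdef
  have hmono := wsLoopA_mono cs pos
  have hlo' : -(cs.length : Int) ≤ p := by omega
  by_cases hc : p < (cs.length : Int) ∧ PySem.List.pyGet? cs p = some '['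
  · have he : charAtB cs p = some '[' := (charAtB_eq cs p hc.1).trans hc.2
    rw [if_pos hc, if_pos he]
    have hF : (cs.length : Int) ≤ (p + 1) + (2 * cs.length + 1 : Nat) := by
      push_cast; omega
    rw [depthLoop_eq_iter cs _ ((cs.length : Int) - (p + 1)).toNat (p + 1) 1
      (le_refl _) hF (by omega) (by omega)]
    rfl
  · have hcn : ¬ charAtB cs p = some '[' := by
      intro h
      exact hc ⟨charAtB_lt h, by rw [← charAtB_eq cs p (charAtB_lt h)]; exact h⟩
    rw [if_neg hc, if_neg hcn]
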